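-- pv_equiv track=rewrite | github.com/facubusta/Truco | funciones/jugador.py | Calcular_envido
-- ===== SOURCE A (Python) =====
-- def Calcular_envido(mano: list) -> int:
--     """
--     Calcula los puntos de Envido en la mano de un jugador según las reglas del Truco.
--     """
--     # Solo considerar las cartas con valores válidos para el Envido (máximo 7)
--     valores_envido = []
--     for carta in mano:
--         valor = carta[0]
--         if valor > 7:  # 10, 11, 12 valen 0
--             valor = 0
--         valores_envido.append(valor)
--
--     # Agrupar las cartas por palo
--     cartas_por_palo = {}
--     for i, carta in enumerate(mano):
--         palo = carta[1]
--         if palo not in cartas_por_palo: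
--             cartas_por_palo[palo] = []
--         cartas_por_palo[palo].append(valores_envido[i])
--
--     maximo_puntaje = 0
--
--     # Calcular el puntaje del Envido
--     for palo, cartas in cartas_por_palo.items():
--         if len(cartas) >= 2:
--             # Ordenar las cartas de mayor a menor
--             cartas.sort(reverse=True)
--             # Sumar las dos mayores y añadir 20
--             puntaje = cartas[0] + cartas[1] + 20
--             maximo_puntaje = max(maximo_puntaje, puntaje)
--
--     # Si no hay cartas del mismo palo, tomar el valor más alto
--     if maximo_puntaje == 0:
--         maximo_puntaje = max(valores_envido)
--
--     return maximo_puntaje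
-- ===== SOURCE B (Python) =====
-- def Calcular_envido(mano: list) -> int:
--     """Puntos de Envido: recorrido par-a-par en lugar de agrupar por palo."""
--     vals = [0 if v > 7 else v for v, _ in mano]
--     cards = [(vals[i], mano[i][1]) for i in range(len(mano))]
--     best = 0
--     while cards:
--         v, p = cards.pop(0)
--         for w, q in cards:
--             if q == p:
--                 s = v + w + 20
--                 if s > best:
--                     best = s
--     return best if best != 0 else max(vals)
-- ===== Notes on version B (the rewrite author's own statement) =====
-- stated objective: simpler
-- what changed: Replaces A's dict-grouping-by-suit plus per-group sort with a single head-vs-rest pairwise scan that keeps a running maximum of val_i+val_j+20 over same-suit pairs; Pre_ only excludes the empty hand, where both A and B raise ValueError on max([]).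
-- outside the precondition, e.g. on Calcular_envido([]): A raises ValueError, B raises ValueError
import Mathlib
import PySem

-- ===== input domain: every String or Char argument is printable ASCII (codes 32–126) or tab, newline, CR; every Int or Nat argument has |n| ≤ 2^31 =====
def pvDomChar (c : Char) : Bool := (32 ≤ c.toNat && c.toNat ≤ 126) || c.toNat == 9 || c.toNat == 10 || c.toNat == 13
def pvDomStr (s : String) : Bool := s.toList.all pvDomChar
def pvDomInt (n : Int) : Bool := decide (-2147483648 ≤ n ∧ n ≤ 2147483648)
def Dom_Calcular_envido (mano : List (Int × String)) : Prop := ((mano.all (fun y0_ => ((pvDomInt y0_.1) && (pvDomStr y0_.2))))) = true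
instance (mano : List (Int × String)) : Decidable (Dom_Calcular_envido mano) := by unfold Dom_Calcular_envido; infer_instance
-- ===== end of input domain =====

-- ===== PORT A =====
-- Port of A: cap values, group by suit via a dict, per group sort desc and take top two + 20.
def Calcular_envido (mano : List (Int × String)) : Int :=
  let valores_envido : List Int :=
    mano.foldl (fun acc carta =>
      let valor := carta.1
      let valor := if valor > 7 then 0 else valor
      acc ++ [valor]) []
  let cartas_por_palo : PySem.Dict String (List Int) :=
    (PySem.List.enumerate mano).foldl (fun d ic =>
      let palo := ic.2.2
      let d := if d.contains palo then d else d.insert palo []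
      d.modify palo [] (fun g => g ++ [PySem.List.pyGetD valores_envido ic.1 0])) PySem.Dict.empty
  let maximo : Int :=
    cartas_por_palo.items.foldl (fun m pc =>
      if 2 ≤ pc.2.length then
        let cartas := PySem.List.sorted pc.2 (fun x => x) true
        max m (PySem.List.pyGetD cartas 0 0 + PySem.List.pyGetD cartas 1 0 + 20)
      else m) 0
  if maximo = 0 then (PySem.List.max? valores_envido (fun x => x)).getD 0 else maximo

-- ===== PORT B =====
-- B: head-vs-rest pairwise scan keeping the running max of v+w+20 over same-suit pairs.
def pvScanRest (v : Int) (p : String) (best : Int) (rest : List (Int × String)) : Int :=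
  rest.foldl (fun b wq =>
    if wq.2 = p then (if v + wq.1 + 20 > b then v + wq.1 + 20 else b) else b) best

def pvGo : Int → List (Int × String) → Int
  | best, [] => best
  | best, (v, p) :: rest => pvGo (pvScanRest v p best rest) rest

def Calcular_envido_alt (mano : List (Int × String)) : Int :=
  let vals : List Int := mano.map (fun c => if c.1 > 7 then 0 else c.1)
  let cards : List (Int × String) :=
    (PySem.List.pyRange 0 (PySem.List.len mano) 1).map
      (fun i => (PySem.List.pyGetD vals i 0, (PySem.List.pyGetD mano i (0, "")).2))
  let best := pvGo 0 cards
  if best ≠ 0 then best else (PySem.List.max? vals (fun x => x)).getD 0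

-- ===== PRECONDITION & SPEC =====
-- Pre_ excludes only the empty hand, where Python A raises ValueError on max([]) (and B does too).
def Pre_Calcular_envido (mano : List (Int × String)) : Prop := mano ≠ []
instance (mano : List (Int × String)) : Decidable (Pre_Calcular_envido mano) := by unfold Pre_Calcular_envido; infer_instance
def pvWitness_Calcular_envido : (List (Int × String)) := [(7, "oro"), (6, "oro"), (3, "copa")]
def Spec_Calcular_envido (mano : List (Int × String)) (out : Int) : Prop := out = Calcular_envido_alt mano
instance (mano : List (Int × String)) (out : Int) : Decidable (Spec_Calcular_envido mano out) := by unfold Spec_Calcular_envido; infer_instance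

-- ===== CLAIM (what is proved, stated in full; the proofs are below) =====
def Claim_equal_Calcular_envido : Prop := ∀ (mano : List (Int × String)), Dom_Calcular_envido mano → Pre_Calcular_envido mano → Spec_Calcular_envido mano (Calcular_envido mano)

-- ===== LEMMAS AND PROOFS =====

-- canonical capped (value, suit) card list both ports work over
def pvCap (v : Int) : Int := if v > 7 then 0 else v

def pvCards (mano : List (Int × String)) : List (Int × String) :=
  mano.map (fun c => (pvCap c.1, c.2))

def pvValsOf (cards : List (Int × String)) (p : String) : List Int :=
  (cards.filter (fun c => c.2 == p)).map (fun c => c.1)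

-- s is the envido score of some ordered same-suit pair of cards
def PairOK (cs : List (Int × String)) (s : Int) : Prop :=
  ∃ v p w l₁ rest, cs = l₁ ++ (v, p) :: rest ∧ (w, p) ∈ rest ∧ s = v + w + 20

-- score A computes for one suit group
def pvScore (g : List Int) : Int :=
  (PySem.List.sorted g (fun x => x) true).getD 0 0 +
    (PySem.List.sorted g (fun x => x) true).getD 1 0 + 20

lemma pairOK_cons {a : Int × String} {cs : List (Int × String)} {s : Int} :
    PairOK (a :: cs) s ↔ (∃ w, (w, a.2) ∈ cs ∧ s = a.1 + w + 20) ∨ PairOK cs s := by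
  constructor
  · rintro ⟨v, p, w, l₁, rest, heq, hw, hs⟩
    cases l₁ with
    | nil =>
      simp only [List.nil_append, List.cons.injEq] at heq
      obtain ⟨h1, h2⟩ := heq
      subst h1 h2
      exact Or.inl ⟨w, hw, hs⟩
    | cons x l₁' =>
      simp only [List.cons_append, List.cons.injEq] at heq
      exact Or.inr ⟨v, p, w, l₁', rest, heq.2, hw, hs⟩
  · rintro (⟨w, hw, hs⟩ | ⟨v, p, w, l₁, rest, heq, hw, hs⟩)
    · exact ⟨a.1, a.2, w, [], cs, by simp, hw, hs⟩
    · exact ⟨v, p, w, a :: l₁, rest, by simp [heq], hw, hs⟩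

-- ---- B side: characterization of the pairwise scan ----

lemma scanRest_le {v : Int} {p : String} (rest : List (Int × String)) (best : Int) :
    best ≤ pvScanRest v p best rest := by
  induction rest generalizing best with
  | nil => simp [pvScanRest]
  | cons c t ih =>
    simp only [pvScanRest, List.foldl_cons] at *
    refine le_trans ?_ (ih _)
    split
    · split <;> omega
    · omega

lemma scanRest_ge {v w : Int} {p : String} {rest : List (Int × String)} (best : Int)
    (hw : (w, p) ∈ rest) : v + w + 20 ≤ pvScanRest v p best rest := by
  induction rest generalizing best with
  | nil => simp at hw
  | cons c t ih =>
    simp only [pvScanRest, List.foldl_cons] at *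
    rcases List.mem_cons.1 hw with h | h
    · subst h
      refine le_trans ?_ (scanRest_le t _)
      rw [if_pos rfl]
      split <;> omega
    · exact ih _ h

lemma scanRest_cases {v : Int} {p : String} (rest : List (Int × String)) (best : Int) :
    pvScanRest v p best rest = best ∨
      ∃ w, (w, p) ∈ rest ∧ pvScanRest v p best rest = v + w + 20 := by
  induction rest generalizing best with
  | nil => left; simp [pvScanRest]
  | cons c t ih =>
    simp only [pvScanRest, List.foldl_cons] at *
    rcases ih (if c.2 = p then (if v + c.1 + 20 > best then v + c.1 + 20 else best) else best) with
      h | ⟨w, hw, h⟩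
    · rw [h]
      split
      · rename_i hc
        split
        · right; exact ⟨c.1, by simp [← hc], rfl⟩
        · left; rfl
      · left; rfl
    · right; exact ⟨w, List.mem_cons_of_mem _ hw, h⟩

lemma pvGo_le (cs : List (Int × String)) (best : Int) : best ≤ pvGo best cs := by
  induction cs generalizing best with
  | nil => simp [pvGo]
  | cons c t ih =>
    obtain ⟨v, p⟩ := c
    exact le_trans (scanRest_le t best) (ih _)

lemma pvGo_ge {cs : List (Int × String)} {s : Int} (h : PairOK cs s) : ∀ best,
    s ≤ pvGo best cs := by
  induction cs with
  | nil => intro best; obtain ⟨v, p, w, l₁, rest, heq, _, _⟩ := h; simp at heq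
  | cons c t ih =>
    intro best
    obtain ⟨v, p⟩ := c
    rcases pairOK_cons.1 h with ⟨w, hw, hs⟩ | h'
    · subst hs
      exact le_trans (scanRest_ge best hw) (pvGo_le t _)
    · exact ih h' _

lemma pvGo_cases (cs : List (Int × String)) (best : Int) :
    pvGo best cs = best ∨ PairOK cs (pvGo best cs) := by
  induction cs generalizing best with
  | nil => left; simp [pvGo]
  | cons c t ih =>
    obtain ⟨v, p⟩ := c
    show pvGo (pvScanRest v p best t) t = best ∨ _
    rcases ih (pvScanRest v p best t) with h | h
    · rw [h]
      rcases scanRest_cases t best with h' | ⟨w, hw, h'⟩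
      · left; exact h'
      · right
        refine pairOK_cons.2 (Or.inl ⟨w, hw, ?_⟩)
        show pvGo (pvScanRest v p best t) t = v + w + 20
        rw [h, h']
    · right; exact pairOK_cons.2 (Or.inr h)

-- ---- sorted / sublist toolkit ----

lemma pvMemLeHead {t : List Int} {z : Int} (hp : t.Pairwise (fun a b => b ≤ a)) (hz : z ∈ t) :
    z ≤ t.getD 0 0 := by
  cases t with
  | nil => simp at hz
  | cons a t' =>
    rcases List.mem_cons.1 hz with h | h
    · simp [h]
    · simpa using le_trans ((List.pairwise_cons.1 hp).1 z h) (le_refl a)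

lemma pvPairSubTop {t : List Int} {x y : Int} (hp : t.Pairwise (fun a b => b ≤ a))
    (hs : List.Sublist [x, y] t) : x + y ≤ t.getD 0 0 + t.getD 1 0 := by
  cases t with
  | nil => simp at hs
  | cons a t' =>
    have hp' := (List.pairwise_cons.1 hp).2
    cases hs with
    | cons _ h =>
      have hx : x ∈ t' := h.subset (by simp)
      have hy : y ∈ t' := h.subset (by simp)
      have h1 : x ≤ a := (List.pairwise_cons.1 hp).1 x hx
      have h2 : y ≤ t'.getD 0 0 := pvMemLeHead hp' hy
      simp only [List.getD_cons_zero, List.getD_cons_succ]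
      omega
    | cons₂ _ h =>
      have hy : y ∈ t' := h.subset (by simp)
      have h2 : y ≤ t'.getD 0 0 := pvMemLeHead hp' hy
      simp only [List.getD_cons_zero, List.getD_cons_succ]
      omega

lemma pvPairSublist_iff {α : Type} {l : List α} {a b : α} :
    List.Sublist [a, b] l ↔ ∃ l₁ l₂, l = l₁ ++ a :: l₂ ∧ b ∈ l₂ := by
  constructor
  · intro h
    induction l with
    | nil => simp at h
    | cons c t ih =>
      cases h with
      | cons _ h' =>
        obtain ⟨l₁, l₂, heq, hb⟩ := ih h'
        exact ⟨c :: l₁, l₂, by simp [heq], hb⟩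
      | cons₂ _ h' =>
        exact ⟨[], t, by simp, h'.subset (by simp)⟩
  · rintro ⟨l₁, l₂, heq, hb⟩
    subst heq
    have h1 : List.Sublist [a, b] (a :: l₂) :=
      List.Sublist.cons₂ a (List.singleton_sublist.2 hb)
    exact h1.trans (List.sublist_append_right l₁ _)

lemma pvPairPermTransfer {g t : List Int} {x y : Int} (hperm : g.Perm t)
    (h : List.Sublist [x, y] g) :
    ∃ x' y', x' + y' = x + y ∧ List.Sublist [x', y'] t := by
  have hsp : List.Subperm [x, y] t := (h.subperm).trans hperm.subperm
  obtain ⟨l, hl, hsub⟩ := hsp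
  have hlen := hl.length_eq
  match l, hlen, hl, hsub with
  | [a, b], _, hl, hsub =>
    have ha : a = x ∨ a = y := by simpa using hl.subset (List.mem_cons_self ..)
    have hb : b = x ∨ b = y := by
      simpa using hl.subset (List.mem_cons_of_mem _ (List.mem_cons_self ..))
    have hx : x = a ∨ x = b := by simpa using (hl.mem_iff).2 (by simp)
    have hy : y = a ∨ y = b := by simpa using (hl.mem_iff).2 (by simp)
    exact ⟨a, b, by omega, hsub⟩

lemma pvPairSublistMap {α β : Type} {f : α → β} {l : List α} {x y : β}
    (h : List.Sublist [x, y] (l.map f)) : ∃ a b, f a = x ∧ f b = y ∧ List.Sublist [a, b] l := by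
  rw [List.sublist_map_iff] at h
  obtain ⟨l', hsub, heq⟩ := h
  match l', heq with
  | [a, b], heq =>
    simp only [List.map_cons, List.map_nil, List.cons.injEq, and_true] at heq
    exact ⟨a, b, heq.1.symm, heq.2.symm, hsub⟩

-- two positions in a suit group vs a same-suit pair in the card list
lemma pvBridge1 {cards : List (Int × String)} {s : Int} (h : PairOK cards s) :
    ∃ p x y, x + y + 20 = s ∧ List.Sublist [x, y] (pvValsOf cards p) ∧ ∃ c ∈ cards, c.2 = p := by
  obtain ⟨v, p, w, l₁, rest, heq, hw, hs⟩ := h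
  refine ⟨p, v, w, by omega, ?_, (v, p), by simp [heq], rfl⟩
  have hfil : pvValsOf cards p =
      ((l₁.filter (fun c => c.2 == p)).map (fun c => c.1)) ++ v ::
        ((rest.filter (fun c => c.2 == p)).map (fun c => c.1)) := by
    simp [pvValsOf, heq, List.filter_append]
  rw [hfil]
  exact pvPairSublist_iff.2
    ⟨(l₁.filter (fun c => c.2 == p)).map (fun c => c.1),
     (rest.filter (fun c => c.2 == p)).map (fun c => c.1), rfl,
     List.mem_map_of_mem (List.mem_filter.2 ⟨hw, by simp⟩)⟩

lemma pvBridge2 {cards : List (Int × String)} {p : String} {x y : Int}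
    (h : List.Sublist [x, y] (pvValsOf cards p)) : PairOK cards (x + y + 20) := by
  obtain ⟨a, b, hax, hby, hab⟩ := pvPairSublistMap h
  have ha2 : a.2 = p := by
    have := List.mem_filter.1 (hab.subset (List.mem_cons_self ..))
    simpa using this.2
  have hb2 : b.2 = p := by
    have := List.mem_filter.1 (hab.subset (List.mem_cons_of_mem _ (List.mem_cons_self ..)))
    simpa using this.2
  have hab' : List.Sublist [a, b] cards := hab.trans List.filter_sublist
  obtain ⟨l₁, l₂, heq, hb⟩ := pvPairSublist_iff.1 hab'
  refine ⟨x, p, y, l₁, l₂, ?_, ?_, rfl⟩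
  · rw [heq]
    congr 1
    rw [← hax, ← ha2]
  · rw [← hby, ← hb2]
    exact hb

lemma pvTopBound {g : List Int} {x y : Int} (h : List.Sublist [x, y] g) :
    x + y + 20 ≤ pvScore g := by
  obtain ⟨x', y', hsum, hsub⟩ :=
    pvPairPermTransfer (PySem.List.sorted_perm g (fun x => x) true).symm h
  have := pvPairSubTop (PySem.List.sorted_pairwise_rev g (fun x => x)) hsub
  unfold pvScore
  omega

lemma pvTopAchieve {g : List Int} (h : 2 ≤ g.length) :
    ∃ x y, x + y + 20 = pvScore g ∧ List.Sublist [x, y] g := by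
  have hlen : 2 ≤ (PySem.List.sorted g (fun x => x) true).length := by
    rwa [(PySem.List.sorted_perm g (fun x => x) true).length_eq]
  match ht : PySem.List.sorted g (fun x => x) true, hlen with
  | t0 :: t1 :: t'', _ =>
    have hsub : List.Sublist [t0, t1] (PySem.List.sorted g (fun x => x) true) := by
      rw [ht]
      exact List.Sublist.cons₂ _ (List.Sublist.cons₂ _ (List.nil_sublist _))
    obtain ⟨x, y, hsum, hsub'⟩ :=
      pvPairPermTransfer (PySem.List.sorted_perm g (fun x => x) true) hsub
    exact ⟨x, y, by simp [pvScore, ht]; omega, hsub'⟩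

-- ---- A side: the dict pipeline ----

lemma pvEnsureModify (d : PySem.Dict String (List Int)) (k : String) (f : List Int → List Int) :
    (if d.contains k then d else d.insert k []).modify k [] f = d.modify k [] f := by
  by_cases hc : d.contains k
  · rw [if_pos hc]
  · have hc' : d.contains k = false := by simpa using hc
    rw [if_neg (by simp [hc'])]
    show (d.insert k []).insert k (f ((d.insert k []).getD k [])) = d.insert k (f (d.getD k []))
    rw [PySem.Dict.getD_insert_self, PySem.Dict.insert_insert_self,
      PySem.Dict.getD_of_not_contains d [] hc']

lemma pvFoldlEnumerateSnd {α β : Type} (g : β → α → β) (xs : List α) : ∀ (s : Int) (d : β),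
    (PySem.List.enumerate xs s).foldl (fun a p => g a p.2) d = xs.foldl g d := by
  induction xs with
  | nil => intro s d; simp [PySem.List.enumerate]
  | cons x t ih =>
    intro s d
    rw [PySem.List.enumerate_cons]
    simpa using ih (s + 1) (g d x)

def pvDictOf (mano : List (Int × String)) : PySem.Dict String (List Int) :=
  mano.foldl (fun d c => d.modify c.2 [] (fun g => g ++ [pvCap c.1])) PySem.Dict.empty

lemma pvDict_eq (mano : List (Int × String)) :
    ((PySem.List.enumerate mano).foldl (fun d ic =>
        (if d.contains ic.2.2 then d else d.insert ic.2.2 []).modify ic.2.2 []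
          (fun g => g ++ [PySem.List.pyGetD (mano.map (fun c => pvCap c.1)) ic.1 0]))
      PySem.Dict.empty) = pvDictOf mano := by
  rw [PySem.List.foldl_congr_mem' _ _
    (fun d (ic : Int × (Int × String)) => d.modify ic.2.2 [] (fun g => g ++ [pvCap ic.2.1])) _ ?_]
  · exact pvFoldlEnumerateSnd (fun d (c : Int × String) =>
      d.modify c.2 [] (fun g => g ++ [pvCap c.1])) mano 0 PySem.Dict.empty
  · intro ic hic acc
    obtain ⟨k, hk, hp⟩ := (PySem.List.mem_enumerate_iff mano 0 ic).1 hic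
    subst hp
    rw [pvEnsureModify]
    have : PySem.List.pyGetD (mano.map (fun c => pvCap c.1)) (0 + (k : Int)) 0
        = pvCap mano[k].1 := by
      rw [zero_add, PySem.List.pyGetD_natCast]
      rw [List.getD_eq_getElem _ _ (by simpa using hk)]
      simp
    rw [this]

lemma pvDict_getD (mano : List (Int × String)) (p : String) :
    (pvDictOf mano).getD p [] = pvValsOf (pvCards mano) p := by
  unfold pvDictOf
  have hfold : mano.foldl (fun d c => d.modify c.2 [] (fun g => g ++ [pvCap c.1]))
      (PySem.Dict.empty : PySem.Dict String (List Int))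
      = (mano.map (fun c => (c.2, pvCap c.1))).foldl
          (fun d q => d.modify q.1 [] (fun g => g ++ [q.2])) PySem.Dict.empty := by
    rw [List.foldl_map]
  rw [hfold, PySem.Dict.getD_foldl_modify_append, PySem.Dict.getD_empty]
  simp only [List.nil_append, List.filter_map, pvValsOf, pvCards, List.map_map]
  congr 1

lemma pvDict_keys (mano : List (Int × String)) :
    (pvDictOf mano).keys = PySem.List.dedup (mano.map (fun c => c.2)) := by
  unfold pvDictOf
  rw [PySem.Dict.keys_foldl_modify_key mano (fun c => c.2) []
    (fun _ c => (fun g => g ++ [pvCap c.1])) PySem.Dict.empty]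
  rw [PySem.Dict.keys_empty, PySem.List.dedup_eq_ofList]
  rfl

lemma pvDict_nodup (mano : List (Int × String)) : (pvDictOf mano).keys.Nodup := by
  unfold pvDictOf
  exact PySem.Dict.nodup_keys_foldl_modify_key mano (fun c => c.2) []
    (fun _ c => (fun g => g ++ [pvCap c.1])) PySem.Dict.empty (by simp [PySem.Dict.keys_empty])

lemma pvDict_items (mano : List (Int × String)) :
    (pvDictOf mano).items = (PySem.List.dedup (mano.map (fun c => c.2))).map
      (fun p => (p, pvValsOf (pvCards mano) p)) := by
  rw [PySem.Dict.items_eq_map_keys _ (pvDict_nodup mano) [], pvDict_keys]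
  exact List.map_congr_left (fun p _ => by rw [pvDict_getD])

-- ---- A side: the max-over-groups fold ----

def pvAF (m : Int) (e : String × List Int) : Int :=
  if 2 ≤ e.2.length then max m (pvScore e.2) else m

lemma pvAF_le (es : List (String × List Int)) (m : Int) : m ≤ es.foldl pvAF m := by
  induction es generalizing m with
  | nil => simp
  | cons e t ih =>
    refine le_trans ?_ (ih (pvAF m e))
    unfold pvAF
    split <;> simp

lemma pvAF_ge {es : List (String × List Int)} {e : String × List Int} (he : e ∈ es)
    (hlen : 2 ≤ e.2.length) (m : Int) : pvScore e.2 ≤ es.foldl pvAF m := by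
  induction es generalizing m with
  | nil => simp at he
  | cons e' t ih =>
    rcases List.mem_cons.1 he with h | h
    · subst h
      refine le_trans ?_ (pvAF_le t _)
      unfold pvAF
      rw [if_pos hlen]
      exact le_max_right _ _
    · exact ih h _

lemma pvAF_cases (es : List (String × List Int)) (m : Int) :
    es.foldl pvAF m = m ∨ ∃ e ∈ es, 2 ≤ e.2.length ∧ es.foldl pvAF m = pvScore e.2 := by
  induction es generalizing m with
  | nil => left; rfl
  | cons e t ih =>
    rcases ih (pvAF m e) with h | ⟨e', he', hlen', h⟩
    · rw [List.foldl_cons, h]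
      unfold pvAF
      split
      · rename_i hlen
        rcases max_cases m (pvScore e.2) with ⟨h1, _⟩ | ⟨h1, _⟩
        · left; exact h1
        · right; exact ⟨e, List.mem_cons_self .., hlen, h1⟩
      · left; rfl
    · right; exact ⟨e', List.mem_cons_of_mem _ he', hlen', h⟩

-- maximo characterization
lemma pvMaximo_ge {mano : List (Int × String)} {s : Int} (h : PairOK (pvCards mano) s) (m0 : Int) :
    s ≤ ((pvDictOf mano).items).foldl pvAF m0 := by
  obtain ⟨p, x, y, hsum, hsub, c, hc, hcp⟩ := pvBridge1 h
  have hmemp : p ∈ PySem.List.dedup (mano.map (fun c => c.2)) := by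
    rw [PySem.List.mem_dedup]
    obtain ⟨c0, hc0, hc0e⟩ := List.mem_map.1 (by exact hc : c ∈ mano.map (fun c => (pvCap c.1, c.2)))
    exact List.mem_map.2 ⟨c0, hc0, by rw [← hcp, ← hc0e]⟩
  have he : (p, pvValsOf (pvCards mano) p) ∈ (pvDictOf mano).items := by
    rw [pvDict_items]
    exact List.mem_map_of_mem hmemp
  have hlen : 2 ≤ (pvValsOf (pvCards mano) p).length := le_trans (by simp) hsub.length_le
  calc s = x + y + 20 := hsum.symm
    _ ≤ pvScore (pvValsOf (pvCards mano) p) := pvTopBound hsub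
    _ ≤ _ := pvAF_ge he hlen m0

lemma pvMaximo_cases (mano : List (Int × String)) :
    ((pvDictOf mano).items).foldl pvAF 0 = 0 ∨
      PairOK (pvCards mano) (((pvDictOf mano).items).foldl pvAF 0) := by
  rcases pvAF_cases ((pvDictOf mano).items) 0 with h | ⟨e, he, hlen, h⟩
  · left; exact h
  · right
    rw [pvDict_items] at he
    obtain ⟨p, _, hpe⟩ := List.mem_map.1 he
    subst hpe
    obtain ⟨x, y, hsum, hsub⟩ :=
      pvTopAchieve (g := pvValsOf (pvCards mano) p) (by simpa using hlen)
    rw [h]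
    show PairOK (pvCards mano) (pvScore (pvValsOf (pvCards mano) p))
    rw [← hsum]
    exact pvBridge2 hsub

-- ---- glue: both ports against the canonical card list ----

lemma pvValores_eq (mano : List (Int × String)) :
    mano.foldl (fun acc carta => acc ++ [if carta.1 > 7 then 0 else carta.1]) []
      = mano.map (fun c => pvCap c.1) := by
  simpa using PySem.List.foldl_append_singleton_eq_map (fun (c : Int × String) => pvCap c.1) mano []

lemma pvCardsB_eq (mano : List (Int × String)) :
    (PySem.List.pyRange 0 (PySem.List.len mano) 1).map
        (fun i => (PySem.List.pyGetD (mano.map (fun c => if c.1 > 7 then 0 else c.1)) i 0,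
          (PySem.List.pyGetD mano i (0, "")).2))
      = pvCards mano := by
  rw [PySem.List.len_eq, PySem.List.pyRange_zero_natCast, List.map_map]
  apply List.ext_getElem
  · simp [pvCards]
  · intro k h1 h2
    have hk : k < mano.length := by simpa using h1
    simp only [List.getElem_map, List.getElem_range, Function.comp_apply,
      PySem.List.pyGetD_natCast]
    rw [List.getD_eq_getElem _ _ (by simpa using hk), List.getD_eq_getElem _ _ hk]
    simp [pvCards, pvCap]

lemma pvMaximoBest (mano : List (Int × String)) :
    ((pvDictOf mano).items).foldl pvAF 0 = pvGo 0 (pvCards mano) := by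
  apply le_antisymm
  · rcases pvMaximo_cases mano with h | h
    · rw [h]; exact pvGo_le _ 0
    · exact pvGo_ge h 0
  · rcases pvGo_cases (pvCards mano) 0 with h | h
    · rw [h]; exact pvAF_le _ 0
    · exact pvMaximo_ge h 0

lemma pvA_closed (mano : List (Int × String)) :
    Calcular_envido mano =
      (if ((pvDictOf mano).items).foldl pvAF 0 = 0 then
        (PySem.List.max? (mano.map (fun c => pvCap c.1)) (fun x => x)).getD 0
      else ((pvDictOf mano).items).foldl pvAF 0) := by
  have h0 : Calcular_envido mano =
      (let valores := mano.foldl (fun acc carta => acc ++ [if carta.1 > 7 then 0 else carta.1]) []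
       let d := (PySem.List.enumerate mano).foldl (fun d ic =>
          (if d.contains ic.2.2 then d else d.insert ic.2.2 []).modify ic.2.2 []
            (fun g => g ++ [PySem.List.pyGetD valores ic.1 0])) PySem.Dict.empty
       let maximo := d.items.foldl (fun m pc =>
          if 2 ≤ pc.2.length then
            max m (PySem.List.pyGetD (PySem.List.sorted pc.2 (fun x => x) true) 0 0 +
              PySem.List.pyGetD (PySem.List.sorted pc.2 (fun x => x) true) 1 0 + 20)
          else m) 0
       if maximo = 0 then (PySem.List.max? valores (fun x => x)).getD 0 else maximo) := rfl
  rw [h0]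
  simp only [pvValores_eq]
  rw [pvDict_eq]
  have hAF : (fun (m : Int) (pc : String × List Int) =>
      if 2 ≤ pc.2.length then
        max m (PySem.List.pyGetD (PySem.List.sorted pc.2 (fun x => x) true) 0 0 +
          PySem.List.pyGetD (PySem.List.sorted pc.2 (fun x => x) true) 1 0 + 20)
      else m) = pvAF := by
    funext m pc
    unfold pvAF pvScore
    rw [PySem.List.pyGetD_zero, PySem.List.pyGetD_ofNat']
  rw [hAF]

lemma pvB_closed (mano : List (Int × String)) :
    Calcular_envido_alt mano =
      (if pvGo 0 (pvCards mano) ≠ 0 then pvGo 0 (pvCards mano)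
       else (PySem.List.max? (mano.map (fun c => pvCap c.1)) (fun x => x)).getD 0) := by
  have h0 : Calcular_envido_alt mano =
      (let vals := mano.map (fun c => if c.1 > 7 then 0 else c.1)
       let cards := (PySem.List.pyRange 0 (PySem.List.len mano) 1).map
          (fun i => (PySem.List.pyGetD vals i 0, (PySem.List.pyGetD mano i (0, "")).2))
       if pvGo 0 cards ≠ 0 then pvGo 0 cards
       else (PySem.List.max? vals (fun x => x)).getD 0) := rfl
  rw [h0]
  simp only [pvCardsB_eq]
  rfl

-- ===== VERDICT (by name: the statement is the Claim_ definition above) =====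
theorem Calcular_envido_spec : Claim_equal_Calcular_envido := by
  intro mano _ _
  unfold Spec_Calcular_envido
  rw [pvA_closed, pvB_closed, pvMaximoBest]
  by_cases hb : pvGo 0 (pvCards mano) = 0 <;> simp [hb]
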